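-- pv_equiv track=rewrite | github.com/PersonalPhoenix/Perelman | Eratosthenes.py | create_ranges_power_based
-- ===== SOURCE A (Python) =====
-- def create_ranges_power_based(num_workers, start_power=10, power_step=5):
--     """Создание диапазонов на основе степеней 10"""
--     ranges = []
--     current_start = 10 ** start_power
--
--     for i in range(num_workers):
--         range_end = current_start * (10 ** power_step) - 1
--         ranges.append((current_start, range_end))
--         current_start = range_end + 1
--
--     return ranges
-- ===== SOURCE B (Python) =====
-- def create_ranges_power_based(num_workers, start_power=10, power_step=5):
--     """Each range computed directly from its index: closed form, no running accumulator."""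
--     return [(10 ** (start_power + i * power_step),
--              10 ** (start_power + (i + 1) * power_step) - 1)
--             for i in range(num_workers)]
-- ===== Notes on version B (the rewrite author's own statement) =====
-- stated objective: simpler
-- what changed: Replaces the loop that chains each range from the previous endpoint via a running current_start accumulator with a single list comprehension computing each (start, end) pair in closed form from its index.
-- outside the precondition, e.g. on create_ranges_power_based(1, 7, -5): A returns [(10000000, 99.00000000000001)], B returns [(10000000, 99)]
import Mathlib
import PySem

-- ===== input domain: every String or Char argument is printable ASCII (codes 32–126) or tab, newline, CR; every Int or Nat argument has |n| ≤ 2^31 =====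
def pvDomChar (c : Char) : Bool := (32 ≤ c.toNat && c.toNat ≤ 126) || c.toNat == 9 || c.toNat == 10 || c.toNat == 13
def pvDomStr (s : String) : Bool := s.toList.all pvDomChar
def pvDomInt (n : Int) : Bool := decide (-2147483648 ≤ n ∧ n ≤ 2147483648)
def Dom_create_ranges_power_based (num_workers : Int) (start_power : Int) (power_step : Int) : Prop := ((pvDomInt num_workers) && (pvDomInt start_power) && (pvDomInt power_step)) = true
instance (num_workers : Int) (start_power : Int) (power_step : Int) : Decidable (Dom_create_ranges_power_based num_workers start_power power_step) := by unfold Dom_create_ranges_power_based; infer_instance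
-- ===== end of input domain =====

-- B replaces A's running `current_start` accumulator with a closed form per index (objective: simpler).

-- ===== PORT A =====
-- literal transliteration of A: fold over range(num_workers), state = (ranges, current_start)
def create_ranges_power_based (num_workers : Int) (start_power : Int) (power_step : Int) : List (Int × Int) :=
  (((PySem.List.pyRange 0 num_workers 1).foldl
    (fun (st : List (Int × Int) × Int) (_i : Int) =>
      let range_end : Int := st.2 * 10 ^ power_step.toNat - 1
      (st.1 ++ [(st.2, range_end)], range_end + 1))
    ([], 10 ^ start_power.toNat))).1

-- ===== PORT B =====
-- literal transliteration of B: list comprehension, each pair from its index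
def create_ranges_power_based_alt (num_workers : Int) (start_power : Int) (power_step : Int) : List (Int × Int) :=
  (PySem.List.pyRange 0 num_workers 1).map (fun i =>
    (10 ^ (start_power + i * power_step).toNat,
     10 ^ (start_power + (i + 1) * power_step).toNat - 1))

-- ===== PRECONDITION & SPEC =====
-- Pre_ excludes inputs where the loop runs with a negative exponent: there Python's 10**e is a
-- float, so A returns a list of float pairs, not a value of the declared list[tuple[int,int]] type.
def Pre_create_ranges_power_based (num_workers : Int) (start_power : Int) (power_step : Int) : Prop :=
  num_workers ≤ 0 ∨ (0 ≤ start_power ∧ 0 ≤ power_step)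
instance (num_workers : Int) (start_power : Int) (power_step : Int) : Decidable (Pre_create_ranges_power_based num_workers start_power power_step) := by unfold Pre_create_ranges_power_based; infer_instance
def pvWitness_create_ranges_power_based : Int × Int × Int := (3, 1, 2)

def Spec_create_ranges_power_based (num_workers : Int) (start_power : Int) (power_step : Int) (out : List (Int × Int)) : Prop := out = create_ranges_power_based_alt num_workers start_power power_step
instance (num_workers : Int) (start_power : Int) (power_step : Int) (out : List (Int × Int)) : Decidable (Spec_create_ranges_power_based num_workers start_power power_step out) := by unfold Spec_create_ranges_power_based; infer_instance

-- ===== CLAIM (what is proved, stated in full; the proofs are below) =====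
def Claim_equal_create_ranges_power_based : Prop := ∀ (num_workers : Int) (start_power : Int) (power_step : Int), Dom_create_ranges_power_based num_workers start_power power_step → Pre_create_ranges_power_based num_workers start_power power_step → Spec_create_ranges_power_based num_workers start_power power_step (create_ranges_power_based num_workers start_power power_step)

-- ===== LEMMAS AND PROOFS =====

-- A's loop in closed form: after n iterations the accumulator holds the mapped ranges and
-- current_start = 10^(p + n*s).
theorem pv_fold_closed (p s : Nat) : ∀ (n : Nat),
    (PySem.List.pyRange 0 (n : Int) 1).foldl
      (fun (st : List (Int × Int) × Int) (_i : Int) =>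
        let range_end : Int := st.2 * 10 ^ s - 1
        (st.1 ++ [(st.2, range_end)], range_end + 1))
      ([], (10 : Int) ^ p)
    = ((List.range n).map (fun k => ((10 : Int) ^ (p + k * s), (10 : Int) ^ (p + (k + 1) * s) - 1)),
       (10 : Int) ^ (p + n * s)) := by
  intro n
  induction n with
  | zero => simp
  | succ n ih =>
    have h : ((n : Int) + 1) = ((n + 1 : Nat) : Int) := by push_cast; ring
    rw [← h, PySem.List.pyRange_one_succ_right (by positivity), List.foldl_append, ih]
    simp only [List.foldl_cons, List.foldl_nil, List.range_succ, List.map_append, List.map_cons,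
      List.map_nil]
    have key : p + n * s + s = p + (n + 1) * s := by ring
    rw [← pow_add, key]
    simp

theorem create_ranges_power_based_spec : Claim_equal_create_ranges_power_based := by
  intro nw sp ps _hdom hpre
  unfold Spec_create_ranges_power_based create_ranges_power_based create_ranges_power_based_alt
  rcases le_or_gt nw 0 with hle | hpos
  · rw [PySem.List.pyRange_one_eq_nil hle]
    simp
  · rcases hpre with hle | ⟨hsp, hps⟩
    · omega
    obtain ⟨n, rfl⟩ : ∃ n : Nat, nw = (n : Int) := ⟨nw.toNat, (Int.toNat_of_nonneg hpos.le).symm⟩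
    rw [pv_fold_closed sp.toNat ps.toNat n]
    rw [PySem.List.pyRange_one]
    simp only [zero_add, Int.sub_zero, Int.toNat_natCast, List.map_map]
    apply List.map_congr_left
    intro k hk
    simp only [Function.comp_apply]
    have h1 : (sp + (k : Int) * ps).toNat = sp.toNat + k * ps.toNat := by
      have : (sp + (k : Int) * ps) = ((sp.toNat + k * ps.toNat : Nat) : Int) := by
        push_cast [Int.toNat_of_nonneg hsp, Int.toNat_of_nonneg hps]; ring
      rw [this, Int.toNat_natCast]
    have h2 : (sp + ((k : Int) + 1) * ps).toNat = sp.toNat + (k + 1) * ps.toNat := by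
      have : (sp + ((k : Int) + 1) * ps) = ((sp.toNat + (k + 1) * ps.toNat : Nat) : Int) := by
        push_cast [Int.toNat_of_nonneg hsp, Int.toNat_of_nonneg hps]; ring
      rw [this, Int.toNat_natCast]
    rw [h1, h2]
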